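-- pv_equiv track=rewrite | github.com/DA-testa/convert-array-into-heap-HelenaAnna | build_heap.py | build_heap
-- ===== SOURCE A (Python) =====
-- def build_heap(data):
--     swaps = []
--     # TODO: Creat heap and heap sort
--     # try to achieve  O(n) and not O(n2)
--     n = len(data)
--     for i in range(n // 2, -1, -1):
--         swaps = heapify(data, i, n, swaps)
--
--     for i in range (n-1, 0, -1):
--         data[0], data[i] = data[i], data[0]
--         swaps.append((0,i))
--
--         swaps = heapify(data, 0, i, swaps)
--
--     return swaps
--
-- def heapify(data, i, n, swaps):
--     while i * 2 +1 < n: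
--         j = i * 2 + 1
--
--         if j + 1 < n and data[j + 1] > data[j]:
--             j += 1
--
--         if data[i] >= data[j]:
--             break
--
--         data[i], data[j] = data[j], data[i]
--         swaps.append((i, j))
--
--         i = j
--
--     return swaps
-- ===== SOURCE B (Python) =====
-- def build_heap(data):
--     n = len(data)
--     out = []
--     i = n // 2
--     while i >= 0:
--         out += _sift(data, i, n)
--         i -= 1
--     i = n - 1
--     while i > 0:
--         data[0], data[i] = data[i], data[0]
--         out += [(0, i)] + _sift(data, 0, i)
--         i -= 1
--     return out
--
-- def _sift(data, i, n):
--     largest = i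
--     l, r = 2 * i + 1, 2 * i + 2
--     if l < n and data[l] > data[largest]:
--         largest = l
--     if r < n and data[r] > data[largest]:
--         largest = r
--     if largest == i:
--         return []
--     data[i], data[largest] = data[largest], data[i]
--     return [(i, largest)] + _sift(data, largest, n)
-- ===== Notes on version B (the rewrite author's own statement) =====
-- stated objective: alternative
-- what changed: Same heapsort trace but a different decomposition: sift-down is a recursive CLRS largest-of-three function that RETURNS its own swap segment, and the two phases concatenate these segments per iteration instead of threading one mutable swaps accumulator through an iterative larger-child while-loop heapify.
import Mathlib
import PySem

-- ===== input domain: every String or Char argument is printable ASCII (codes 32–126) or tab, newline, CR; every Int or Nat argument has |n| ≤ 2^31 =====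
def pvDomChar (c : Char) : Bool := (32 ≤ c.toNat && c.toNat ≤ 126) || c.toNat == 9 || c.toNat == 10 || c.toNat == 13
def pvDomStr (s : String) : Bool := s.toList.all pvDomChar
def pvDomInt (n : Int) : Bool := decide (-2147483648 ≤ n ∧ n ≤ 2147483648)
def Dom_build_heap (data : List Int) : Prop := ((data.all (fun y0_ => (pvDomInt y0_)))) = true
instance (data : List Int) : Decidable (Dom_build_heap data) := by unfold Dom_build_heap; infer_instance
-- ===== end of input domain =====

-- B re-decomposes A: a recursive largest-of-three sift-down RETURNS its own swap
-- segment and the two phases concatenate segments, instead of A's iterative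
-- larger-child heapify threading one swaps accumulator. Both Pythons mutate `data`
-- in place; the theorems are about the returned swap list only.

-- ===== PORT A =====
-- the child A's while-step descends to: left child, or right child if strictly larger
def childA (data : List Int) (i n : Nat) : Nat :=
  if 2*i+2 < n ∧ data.getD (2*i+2) 0 > data.getD (2*i+1) 0 then 2*i+2 else 2*i+1

theorem childA_bounds (data : List Int) (i n : Nat) (_h : 2*i+1 < n) :
    i < childA data i n ∧ childA data i n < n := by
  unfold childA; split <;> omega

-- A's `heapify` while loop; the mutated list travels with the swap list
def heapifyA (data : List Int) (i n : Nat) (swaps : List (Int × Int)) :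
    List Int × List (Int × Int) :=
  if h : 2*i+1 < n then
    let j := childA data i n
    if data.getD i 0 ≥ data.getD j 0 then (data, swaps)
    else heapifyA ((data.set i (data.getD j 0)).set j (data.getD i 0)) j n
           (swaps ++ [((i : Int), (j : Int))])
  else (data, swaps)
termination_by n - i
decreasing_by
  have := childA_bounds data i n h; omega

def build_heap (data : List Int) : List (Int × Int) :=
  let n := data.length
  let st1 := (List.range (n/2+1)).reverse.foldl
      (fun (st : List Int × List (Int × Int)) i => heapifyA st.1 i n st.2) (data, [])
  let st2 := (List.range' 1 (n-1)).reverse.foldl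
      (fun (st : List Int × List (Int × Int)) i =>
        let d := st.1
        let d' := (d.set 0 (d.getD i 0)).set i (d.getD 0 0)
        heapifyA d' 0 i (st.2 ++ [((0 : Int), (i : Int))])) st1
  st2.2

-- ===== PORT B =====
-- `largest` after the left-child test of B's `_sift`
def leftSel (data : List Int) (i n : Nat) : Nat :=
  if 2*i+1 < n ∧ data.getD (2*i+1) 0 > data.getD i 0 then 2*i+1 else i

-- `largest` after the right-child test
def largestB (data : List Int) (i n : Nat) : Nat :=
  if 2*i+2 < n ∧ data.getD (2*i+2) 0 > data.getD (leftSel data i n) 0 then 2*i+2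
  else leftSel data i n

theorem largestB_bounds (data : List Int) (i n : Nat) :
    largestB data i n = i ∨ (i < largestB data i n ∧ largestB data i n < n) := by
  unfold largestB leftSel; split_ifs <;> omega

-- B's `_sift`: returns the mutated list and ITS OWN swap segment (no accumulator)
def siftB (data : List Int) (i n : Nat) : List Int × List (Int × Int) :=
  let m := largestB data i n
  if h : m = i then (data, [])
  else
    let rest := siftB ((data.set i (data.getD m 0)).set m (data.getD i 0)) m n
    (rest.1, ((i : Int), (m : Int)) :: rest.2)
termination_by n - i
decreasing_by
  have := largestB_bounds data i n; omega

-- B's first while-loop, counting `k` down (counter k stands for index k-1)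
def buildB (data : List Int) (k n : Nat) : List Int × List (Int × Int) :=
  match k with
  | 0 => (data, [])
  | Nat.succ j =>
    let p := siftB data j n
    let q := buildB p.1 j n
    (q.1, p.2 ++ q.2)

-- B's second while-loop, counting the sort index `i` down to 1
def sortB (data : List Int) (i : Nat) : List Int × List (Int × Int) :=
  match i with
  | 0 => (data, [])
  | Nat.succ j =>
    let i' := j + 1
    let d := (data.set 0 (data.getD i' 0)).set i' (data.getD 0 0)
    let p := siftB d 0 i'
    let q := sortB p.1 j
    (q.1, ((0 : Int), (i' : Int)) :: (p.2 ++ q.2))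

def build_heap_alt (data : List Int) : List (Int × Int) :=
  let n := data.length
  let p := buildB data (n/2 + 1) n
  let q := sortB p.1 (n - 1)
  p.2 ++ q.2

-- ===== PRECONDITION & SPEC =====
def Spec_build_heap (data : List Int) (out : List (Int × Int)) : Prop := out = build_heap_alt data
instance (data : List Int) (out : List (Int × Int)) : Decidable (Spec_build_heap data out) := by unfold Spec_build_heap; infer_instance

-- ===== CLAIM (what is proved, stated in full; the proofs are below) =====
def Claim_equal_build_heap : Prop := ∀ (data : List Int), Dom_build_heap data → Spec_build_heap data (build_heap data)

-- ===== LEMMAS AND PROOFS =====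

-- one-step agreement of the two selections
theorem largest_eq_child (data : List Int) (i n : Nat) (h : 2*i+1 < n) :
    (largestB data i n = i ↔ data.getD i 0 ≥ data.getD (childA data i n) 0) ∧
    (¬ data.getD i 0 ≥ data.getD (childA data i n) 0 → largestB data i n = childA data i n) := by
  unfold largestB leftSel childA
  split_ifs <;> constructor <;> omega

theorem largest_eq_self (data : List Int) (i n : Nat) (_h : ¬ 2*i+1 < n) :
    largestB data i n = i := by
  unfold largestB leftSel; split_ifs <;> omega

-- A's accumulator-threading heapify equals B's segment-returning sift
theorem heapifyA_eq_sift (data : List Int) (i n : Nat) (swaps : List (Int × Int)) :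
    heapifyA data i n swaps = ((siftB data i n).1, swaps ++ (siftB data i n).2) := by
  rw [heapifyA, siftB]
  by_cases h : 2*i+1 < n
  · simp only [dif_pos h]
    obtain ⟨hiff, hch⟩ := largest_eq_child data i n h
    by_cases hstop : data.getD i 0 ≥ data.getD (childA data i n) 0
    · rw [if_pos hstop, dif_pos (hiff.mpr hstop)]; simp
    · rw [if_neg hstop, dif_neg (by rw [hiff]; exact hstop), hch hstop,
        heapifyA_eq_sift]
      simp
  · rw [dif_neg h, dif_pos (largest_eq_self data i n h)]; simp
termination_by n - i
decreasing_by
  have := childA_bounds data i n h; omega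

-- A's build-phase fold equals B's first countdown loop
theorem build_fold_eq (n : Nat) :
    ∀ (k : Nat) (data : List Int) (sw : List (Int × Int)),
    (List.range k).reverse.foldl
      (fun (st : List Int × List (Int × Int)) i => heapifyA st.1 i n st.2) (data, sw)
    = ((buildB data k n).1, sw ++ (buildB data k n).2) := by
  intro k
  induction k with
  | zero => intro data sw; simp [buildB]
  | succ j ih =>
    intro data sw
    rw [List.range_succ, List.reverse_append]
    simp only [List.reverse_singleton, List.singleton_append, List.foldl_cons]
    rw [heapifyA_eq_sift, ih]
    simp [buildB]

-- A's sort-phase fold equals B's second countdown loop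
theorem sort_fold_eq :
    ∀ (m : Nat) (data : List Int) (sw : List (Int × Int)),
    (List.range' 1 m).reverse.foldl
      (fun (st : List Int × List (Int × Int)) i =>
        let d := st.1
        let d' := (d.set 0 (d.getD i 0)).set i (d.getD 0 0)
        heapifyA d' 0 i (st.2 ++ [((0 : Int), (i : Int))])) (data, sw)
    = ((sortB data m).1, sw ++ (sortB data m).2) := by
  intro m
  induction m with
  | zero => intro data sw; simp [sortB]
  | succ j ih =>
    intro data sw
    rw [List.range'_concat, List.reverse_append]
    simp only [List.reverse_singleton, List.singleton_append, List.foldl_cons]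
    rw [heapifyA_eq_sift, ih]
    simp [sortB, Nat.add_comm 1 j]

-- ===== VERDICT (by name: the statement is the Claim_ definition above) =====
theorem build_heap_spec : Claim_equal_build_heap := by
  intro data _
  unfold Spec_build_heap build_heap build_heap_alt
  simp only [build_fold_eq, sort_fold_eq]
  simp
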